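-- pv_equiv track=rewrite | github.com/TheoGicquel/L3-IrisaParser | irisaparser/title_lib.py | match_potential_titles
-- ===== SOURCE A (Python) =====
-- def match_potential_titles(lines_input, potential_titles):
--     """
--     check extracted lines against found titles (using font regrouping)
--     if they both match, add the title to result array
--     """
--     lines = lines_input
--     res = []
--
--     for pot_title in potential_titles:
--         prev = ""
--
--         for line in lines:
--
--             # removes spaces
--             raw_title = pot_title.replace(" ", "")
--             raw_line = line.replace(" ", "")
--
--             if raw_line == raw_title:
--                 res.append(line)
--
--             """
--             Try joining current lines with precedent one to form a title match
--             This is used to parse a title if a newline was present in a title.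
--             """
--             prev_raw_line = prev.replace(" ", "")
--             concat_prev = prev_raw_line + raw_line
--
--             if concat_prev == raw_title:
--                 res.append((prev + " " + line))
--
--             prev = line
--     return res
-- ===== SOURCE B (Python) =====
-- def match_potential_titles(lines_input, potential_titles):
--     # Build (space-stripped key, candidate output) pairs once: each line alone,
--     # and each line joined with its predecessor.
--     entries = []
--     prev = ""
--     for line in lines_input:
--         raw = line.replace(" ", "")
--         entries.append((raw, line))
--         entries.append((prev.replace(" ", "") + raw, prev + " " + line))
--         prev = line
--     # Index candidates by key (one pass), then look each title up.
--     index = {}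
--     for key, val in entries:
--         index.setdefault(key, []).append(val)
--     res = []
--     for t in potential_titles:
--         res += index.get(t.replace(" ", ""), [])
--     return res
-- ===== Notes on version B (the rewrite author's own statement) =====
-- stated objective: faster
-- what changed: B builds the (stripped-key, candidate) pairs for single lines and consecutive-line joins once, hash-indexes them by key, and then answers each title by one dictionary lookup, instead of A's nested loop that re-scans and re-strips every line for every title.
import Mathlib
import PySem

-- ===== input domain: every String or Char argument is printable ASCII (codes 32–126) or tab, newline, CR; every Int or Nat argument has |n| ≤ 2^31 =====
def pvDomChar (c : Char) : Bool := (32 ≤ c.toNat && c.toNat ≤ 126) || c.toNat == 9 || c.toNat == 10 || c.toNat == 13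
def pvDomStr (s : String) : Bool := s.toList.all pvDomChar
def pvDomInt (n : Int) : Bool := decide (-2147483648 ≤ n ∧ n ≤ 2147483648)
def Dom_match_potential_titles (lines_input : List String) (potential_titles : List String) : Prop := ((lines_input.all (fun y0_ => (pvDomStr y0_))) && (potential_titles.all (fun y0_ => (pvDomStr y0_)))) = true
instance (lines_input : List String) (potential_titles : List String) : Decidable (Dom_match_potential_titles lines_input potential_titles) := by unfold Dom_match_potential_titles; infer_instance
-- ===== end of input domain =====

-- B indexes lines and consecutive-line joins by space-stripped key once, then looks each title up (objective: faster, asymptotic).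

-- ===== PORT A =====
-- s.replace(" ", "")
def pvStrip (s : String) : String := PySem.Str.replace s " " ""

def match_potential_titles (lines_input : List String) (potential_titles : List String) : List String :=
  let lines := lines_input
  potential_titles.foldl (fun res pot_title =>
    (lines.foldl (fun (st : String × List String) line =>
      let prev := st.1
      let res := st.2
      let raw_title := pvStrip pot_title
      let raw_line := pvStrip line
      let res := if raw_line == raw_title then res ++ [line] else res
      let prev_raw_line := pvStrip prev
      let concat_prev := prev_raw_line ++ raw_line
      let res := if concat_prev == raw_title then res ++ [prev ++ " " ++ line] else res
      (line, res)) ("", res)).2) []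

-- ===== PORT B =====
def match_potential_titles_alt (lines_input : List String) (potential_titles : List String) : List String :=
  let entries := (lines_input.foldl (fun (st : String × List (String × String)) line =>
      let prev := st.1
      let entries := st.2
      let raw := pvStrip line
      let entries := entries ++ [(raw, line)]
      let entries := entries ++ [(pvStrip prev ++ raw, prev ++ " " ++ line)]
      (line, entries)) ("", [])).2
  let index := entries.foldl (fun (d : PySem.Dict String (List String)) p =>
      d.modify p.1 [] (· ++ [p.2])) PySem.Dict.empty
  potential_titles.foldl (fun res t => res ++ index.getD (pvStrip t) []) []

-- ===== PRECONDITION & SPEC =====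
def Spec_match_potential_titles (lines_input : List String) (potential_titles : List String) (out : List String) : Prop := out = match_potential_titles_alt lines_input potential_titles
instance (lines_input : List String) (potential_titles : List String) (out : List String) : Decidable (Spec_match_potential_titles lines_input potential_titles out) := by unfold Spec_match_potential_titles; infer_instance

-- ===== CLAIM (what is proved, stated in full; the proofs are below) =====
def Claim_equal_match_potential_titles : Prop := ∀ (lines_input : List String) (potential_titles : List String), Dom_match_potential_titles lines_input potential_titles → Spec_match_potential_titles lines_input potential_titles (match_potential_titles lines_input potential_titles)

-- ===== LEMMAS AND PROOFS =====

-- the stream of (stripped key, candidate output) pairs produced from `lines` with predecessor `prev`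
def pvEntries (prev : String) : List String → List (String × String)
  | [] => []
  | l :: ls =>
      (pvStrip l, l) :: (pvStrip prev ++ pvStrip l, prev ++ " " ++ l) :: pvEntries l ls

-- B's entry-building loop accumulates exactly pvEntries
theorem pvEntries_foldl (lines : List String) (prev : String) (acc : List (String × String)) :
    (lines.foldl (fun (st : String × List (String × String)) line =>
      (line, (st.2 ++ [(pvStrip line, line)]) ++ [(pvStrip st.1 ++ pvStrip line, st.1 ++ " " ++ line)]))
      (prev, acc)).2 = acc ++ pvEntries prev lines := by
  induction lines generalizing prev acc with
  | nil => simp [pvEntries]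
  | cons l ls ih =>
      simp only [List.foldl_cons]
      rw [ih]
      simp [pvEntries]

-- A's inner loop over all lines, for one title, collects the matching candidates in stream order
theorem pvInnerA (lines : List String) (rt prev : String) (res : List String) :
    (lines.foldl (fun (st : String × List String) line =>
      (line,
        (if pvStrip line == rt then st.2 ++ [line] else st.2) ++
          (if pvStrip st.1 ++ pvStrip line == rt then [st.1 ++ " " ++ line] else [])))
      (prev, res)).2
      = res ++ ((pvEntries prev lines).filter (fun p => p.1 == rt)).map (·.2) := by
  induction lines generalizing prev res with
  | nil => simp [pvEntries]
  | cons l ls ih =>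
      simp only [List.foldl_cons, ih, pvEntries, List.filter_cons]
      by_cases h1 : pvStrip l == rt <;> by_cases h2 : pvStrip prev ++ pvStrip l == rt <;>
        simp [h1, h2, List.append_assoc]
  
-- A's inner-loop body, rewritten so the two conditional appends are a single append of conditionals
theorem pvInnerA_body (lines : List String) (rt prev : String) (res : List String) :
    (lines.foldl (fun (st : String × List String) line =>
      let prev := st.1
      let res := st.2
      let res := if pvStrip line == rt then res ++ [line] else res
      let res := if pvStrip prev ++ pvStrip line == rt then res ++ [prev ++ " " ++ line] else res
      (line, res)) (prev, res))
    = (lines.foldl (fun (st : String × List String) line =>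
      (line,
        (if pvStrip line == rt then st.2 ++ [line] else st.2) ++
          (if pvStrip st.1 ++ pvStrip line == rt then [st.1 ++ " " ++ line] else [])))
      (prev, res)) := by
  induction lines generalizing prev res with
  | nil => rfl
  | cons l ls ih =>
      simp only [List.foldl_cons]
      rw [ih]
      congr 1
      by_cases h2 : pvStrip prev ++ pvStrip l == rt <;> simp [h2]

theorem match_potential_titles_eq (lines_input potential_titles : List String) :
    match_potential_titles lines_input potential_titles
      = match_potential_titles_alt lines_input potential_titles := by
  unfold match_potential_titles match_potential_titles_alt
  simp only []
  rw [pvEntries_foldl lines_input "" []]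
  simp only [List.nil_append]
  have hidx : ∀ k : String,
      ((pvEntries "" lines_input).foldl (fun (d : PySem.Dict String (List String)) p =>
        d.modify p.1 [] (· ++ [p.2])) PySem.Dict.empty).getD k []
      = (((pvEntries "" lines_input).filter (fun p => p.1 == k)).map (·.2)) := by
    intro k
    rw [PySem.Dict.getD_foldl_modify_append]
    simp
  induction potential_titles using List.reverseRecOn with
  | nil => rfl
  | append_singleton ts t ih =>
      simp only [List.foldl_append, List.foldl_cons, List.foldl_nil]
      rw [ih, hidx, pvInnerA_body, pvInnerA]

-- ===== VERDICT (by name: the statement is the Claim_ definition above) =====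
theorem match_potential_titles_spec : Claim_equal_match_potential_titles := by
  intro lines_input potential_titles _
  unfold Spec_match_potential_titles
  exact match_potential_titles_eq lines_input potential_titles
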